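-- pv_equiv track=rewrite | github.com/i-avgerinos/local_branching | tardiness_subproblem.py | relaxation
-- ===== SOURCE A (Python) =====
-- def relaxation(solution, processing_times, setup_times, deadlines):
--     rb = 0 # The bound of the relaxation
--     for m in solution.keys():
--         timeline = 0
--         if len(solution[m]) > 0:
--             timeline += processing_times[solution[m][0], m]
--             rb += max([0, timeline - deadlines[solution[m][0]]])
--         if len(solution[m]) > 1:
--             old_job = solution[m][0]
--             for j in solution[m][1:]:
--                 timeline += processing_times[j, m] + setup_times[old_job, j, m]
--                 rb += max([0, timeline - deadlines[j]])
--                 old_job = j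
--     return rb # Return the value of the relaxed bound
-- ===== SOURCE B (Python) =====
-- def relaxation(solution, processing_times, setup_times, deadlines):
--     rb = 0
--     for m, seq in solution.items():
--         if not seq:
--             continue
--         costs = [processing_times[seq[0], m]]
--         for prev, j in zip(seq, seq[1:]):
--             costs.append(processing_times[j, m] + setup_times[prev, j, m])
--         comps = []
--         t = 0
--         for c in costs:
--             t += c
--             comps.append(t)
--         rb += sum(max(0, c - deadlines[j]) for c, j in zip(comps, seq))
--     return rb
-- ===== Notes on version B (the rewrite author's own statement) =====
-- stated objective: alternative
-- what changed: Replaces A's inline first-job special case and interleaved timeline/bound updates by a build-table-then-scan decomposition: per machine it first builds the per-job cost list, turns it into completion times by a separate accumulation pass, then sums the tardiness in a final zip pass.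
import Mathlib
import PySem

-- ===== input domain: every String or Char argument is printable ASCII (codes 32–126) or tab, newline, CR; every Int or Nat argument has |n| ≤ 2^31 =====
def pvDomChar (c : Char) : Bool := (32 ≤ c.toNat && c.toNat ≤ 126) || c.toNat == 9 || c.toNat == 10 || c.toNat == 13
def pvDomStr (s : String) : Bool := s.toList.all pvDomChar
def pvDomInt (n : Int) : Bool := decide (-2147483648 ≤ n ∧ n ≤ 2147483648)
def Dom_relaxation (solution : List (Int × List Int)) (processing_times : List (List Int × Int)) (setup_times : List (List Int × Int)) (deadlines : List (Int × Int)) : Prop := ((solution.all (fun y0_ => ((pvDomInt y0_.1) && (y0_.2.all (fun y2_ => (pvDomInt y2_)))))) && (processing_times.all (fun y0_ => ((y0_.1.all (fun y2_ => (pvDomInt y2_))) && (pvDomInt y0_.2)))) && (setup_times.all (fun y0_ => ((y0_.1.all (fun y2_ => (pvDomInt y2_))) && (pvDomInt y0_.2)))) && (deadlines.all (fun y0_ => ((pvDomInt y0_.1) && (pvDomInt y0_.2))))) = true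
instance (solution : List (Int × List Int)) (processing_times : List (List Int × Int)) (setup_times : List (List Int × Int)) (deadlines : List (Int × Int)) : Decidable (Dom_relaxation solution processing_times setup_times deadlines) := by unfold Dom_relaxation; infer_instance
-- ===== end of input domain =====

-- B replaces A's inline first-job special case + interleaved timeline/tardiness updates by a
-- build-cost-table / accumulate / scan decomposition per machine (same cost, 'alternative').

-- ===== PORT A =====
-- literal transliteration of A: iterate over the dict's keys, look the sequence up,
-- special-case the first job, then fold (rb, timeline, old_job) over the tail.
def relaxation (solution : List (Int × List Int)) (processing_times : List (List Int × Int)) (setup_times : List (List Int × Int)) (deadlines : List (Int × Int)) : Int :=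
  let sol := PySem.Dict.ofList solution
  let pt := PySem.Dict.ofList processing_times
  let st := PySem.Dict.ofList setup_times
  let dl := PySem.Dict.ofList deadlines
  sol.keys.foldl (fun rb m =>
    let seq := sol.getD m []
    let timeline : Int := 0
    let s1 : Int × Int :=
      if seq.length > 0 then
        let timeline := timeline + pt.getD [seq.headD 0, m] 0      -- seq[0]; guarded by len > 0
        (rb + max 0 (timeline - dl.getD (seq.headD 0) 0), timeline)
      else (rb, timeline)
    if seq.length > 1 then
      ((seq.drop 1).foldl (fun (s : Int × Int × Int) j =>
        let timeline := s.2.1 + pt.getD [j, m] 0 + st.getD [s.2.2, j, m] 0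
        (s.1 + max 0 (timeline - dl.getD j 0), timeline, j)) (s1.1, s1.2, seq.headD 0)).1
    else s1.1) 0

-- ===== PORT B =====
-- Source B's manual accumulate loop: comps = running sums of costs
def pvAccum (t : Int) : List Int → List Int
  | [] => []
  | c :: cs => (t + c) :: pvAccum (t + c) cs

def relaxation_alt (solution : List (Int × List Int)) (processing_times : List (List Int × Int)) (setup_times : List (List Int × Int)) (deadlines : List (Int × Int)) : Int :=
  let pt := PySem.Dict.ofList processing_times
  let st := PySem.Dict.ofList setup_times
  let dl := PySem.Dict.ofList deadlines
  (PySem.Dict.ofList solution).items.foldl (fun rb p =>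
    match p.2 with
    | [] => rb
    | j0 :: rest =>
      let costs := pt.getD [j0, p.1] 0 ::
        ((j0 :: rest).zip rest).map (fun q => pt.getD [q.2, p.1] 0 + st.getD [q.1, q.2, p.1] 0)
      let comps := pvAccum 0 costs
      rb + ((comps.zip (j0 :: rest)).map (fun q => max 0 (q.1 - dl.getD q.2 0))).sum) 0

-- ===== PRECONDITION & SPEC =====
-- Pre_ excludes exactly the inputs on which Python A raises KeyError: some scheduled job is
-- missing its processing-time, setup-time or deadline entry (the ports return a default there).
def Pre_relaxation (solution : List (Int × List Int)) (processing_times : List (List Int × Int)) (setup_times : List (List Int × Int)) (deadlines : List (Int × Int)) : Prop :=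
  ∀ p ∈ solution,
    (∀ j ∈ p.2, (PySem.Dict.ofList processing_times).contains [j, p.1] = true ∧
                (PySem.Dict.ofList deadlines).contains j = true) ∧
    (∀ q ∈ p.2.zip p.2.tail, (PySem.Dict.ofList setup_times).contains [q.1, q.2, p.1] = true)
instance (solution : List (Int × List Int)) (processing_times : List (List Int × Int)) (setup_times : List (List Int × Int)) (deadlines : List (Int × Int)) : Decidable (Pre_relaxation solution processing_times setup_times deadlines) := by unfold Pre_relaxation; infer_instance

def pvWitness_relaxation : (List (Int × List Int)) × (List (List Int × Int)) × (List (List Int × Int)) × (List (Int × Int)) :=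
  ([(0, [1, 2])], [([1, 0], 3), ([2, 0], 4)], [([1, 2, 0], 5)], [(1, 2), (2, 100)])

def Spec_relaxation (solution : List (Int × List Int)) (processing_times : List (List Int × Int)) (setup_times : List (List Int × Int)) (deadlines : List (Int × Int)) (out : Int) : Prop := out = relaxation_alt solution processing_times setup_times deadlines
instance (solution : List (Int × List Int)) (processing_times : List (List Int × Int)) (setup_times : List (List Int × Int)) (deadlines : List (Int × Int)) (out : Int) : Decidable (Spec_relaxation solution processing_times setup_times deadlines out) := by unfold Spec_relaxation; infer_instance

-- ===== CLAIM (what is proved, stated in full; the proofs are below) =====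
def Claim_equal_relaxation : Prop := ∀ (solution : List (Int × List Int)) (processing_times : List (List Int × Int)) (setup_times : List (List Int × Int)) (deadlines : List (Int × Int)), Dom_relaxation solution processing_times setup_times deadlines → Pre_relaxation solution processing_times setup_times deadlines → Spec_relaxation solution processing_times setup_times deadlines (relaxation solution processing_times setup_times deadlines)

-- ===== LEMMAS AND PROOFS =====
lemma pv_inner_eq (pt st : PySem.Dict (List Int) Int) (dl : PySem.Dict Int Int) (m : Int) :
    ∀ (rest : List Int) (rb t old : Int),
      (rest.foldl (fun (s : Int × Int × Int) j =>
        let timeline := s.2.1 + pt.getD [j, m] 0 + st.getD [s.2.2, j, m] 0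
        (s.1 + max 0 (timeline - dl.getD j 0), timeline, j)) (rb, t, old)).1
      = rb + (((pvAccum t (((old :: rest).zip rest).map
            (fun q => pt.getD [q.2, m] 0 + st.getD [q.1, q.2, m] 0))).zip rest).map
            (fun q => max 0 (q.1 - dl.getD q.2 0))).sum := by
  intro rest
  induction rest with
  | nil => intro rb t old; simp [pvAccum]
  | cons j rs ih =>
    intro rb t old
    simp only [List.foldl_cons, List.zip_cons_cons, List.map_cons, pvAccum, List.sum_cons]
    rw [ih]
    have h : t + (pt.getD [j, m] 0 + st.getD [old, j, m] 0)
           = t + pt.getD [j, m] 0 + st.getD [old, j, m] 0 := by ring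
    rw [h]
    ring

lemma pv_body_eq (pt st : PySem.Dict (List Int) Int) (dl : PySem.Dict Int Int) (rb m : Int)
    (seq : List Int) :
    (let timeline : Int := 0
     let s1 : Int × Int :=
       if seq.length > 0 then
         let timeline := timeline + pt.getD [seq.headD 0, m] 0
         (rb + max 0 (timeline - dl.getD (seq.headD 0) 0), timeline)
       else (rb, timeline)
     if seq.length > 1 then
       ((seq.drop 1).foldl (fun (s : Int × Int × Int) j =>
         let timeline := s.2.1 + pt.getD [j, m] 0 + st.getD [s.2.2, j, m] 0
         (s.1 + max 0 (timeline - dl.getD j 0), timeline, j)) (s1.1, s1.2, seq.headD 0)).1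
     else s1.1)
    = (match seq with
       | [] => rb
       | j0 :: rest =>
         let costs := pt.getD [j0, m] 0 ::
           ((j0 :: rest).zip rest).map (fun q => pt.getD [q.2, m] 0 + st.getD [q.1, q.2, m] 0)
         let comps := pvAccum 0 costs
         rb + ((comps.zip (j0 :: rest)).map (fun q => max 0 (q.1 - dl.getD q.2 0))).sum) := by
  match seq with
  | [] => simp
  | [j0] => simp [pvAccum]
  | j0 :: j1 :: rs =>
    have h0 : rs.length + 1 + 1 > 0 := by omega
    have h1 : rs.length + 1 + 1 > 1 := by omega
    simp only [List.length_cons, List.headD_cons, List.drop_succ_cons, List.drop_zero,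
      List.zip_cons_cons, List.map_cons, pvAccum, List.sum_cons, if_pos h0, if_pos h1]
    rw [pv_inner_eq]
    simp only [List.zip_cons_cons, List.map_cons, pvAccum, List.sum_cons]
    ring

theorem pv_relaxation_eq (solution : List (Int × List Int)) (processing_times : List (List Int × Int)) (setup_times : List (List Int × Int)) (deadlines : List (Int × Int)) :
    relaxation solution processing_times setup_times deadlines
    = relaxation_alt solution processing_times setup_times deadlines := by
  unfold relaxation relaxation_alt
  rw [PySem.Dict.items_eq_map_keys (PySem.Dict.ofList solution)
      (PySem.Dict.nodup_keys_ofList solution) ([] : List Int)]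
  rw [List.foldl_map]
  apply PySem.List.foldl_congr_mem
  intro rb m _
  exact pv_body_eq _ _ _ rb m _

-- ===== VERDICT (by name: the statement is the Claim_ definition above) =====
theorem relaxation_spec : Claim_equal_relaxation := by
  intro solution processing_times setup_times deadlines _ _
  unfold Spec_relaxation
  exact pv_relaxation_eq solution processing_times setup_times deadlines
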